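-- pv_equiv track=rewrite | github.com/lpanzieri/SoccerDataAnalysis | scripts/maintenance/build_major5_retry_schedule.py | split_item_calls
-- ===== SOURCE A (Python) =====
-- from typing import Dict, List, Tuple
--
-- def split_item_calls(item_calls: int, max_batch_calls: int) -> List[int]:
--     remaining = max(1, int(item_calls))
--     chunks: List[int] = []
--     while remaining > 0:
--         take = min(remaining, max_batch_calls)
--         chunks.append(take)
--         remaining -= take
--     return chunks
-- ===== SOURCE B (Python) =====
-- from typing import List
--
-- def split_item_calls(item_calls: int, max_batch_calls: int) -> List[int]:
--     n = max(1, int(item_calls))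
--     k, rem = divmod(n, max_batch_calls)
--     return [max_batch_calls] * k + ([rem] if rem else [])
-- ===== Notes on version B (the rewrite author's own statement) =====
-- stated objective: simpler
-- what changed: Replaces the subtract-until-zero loop with a single divmod decomposition: k full batches plus an optional remainder chunk.
import Mathlib
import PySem

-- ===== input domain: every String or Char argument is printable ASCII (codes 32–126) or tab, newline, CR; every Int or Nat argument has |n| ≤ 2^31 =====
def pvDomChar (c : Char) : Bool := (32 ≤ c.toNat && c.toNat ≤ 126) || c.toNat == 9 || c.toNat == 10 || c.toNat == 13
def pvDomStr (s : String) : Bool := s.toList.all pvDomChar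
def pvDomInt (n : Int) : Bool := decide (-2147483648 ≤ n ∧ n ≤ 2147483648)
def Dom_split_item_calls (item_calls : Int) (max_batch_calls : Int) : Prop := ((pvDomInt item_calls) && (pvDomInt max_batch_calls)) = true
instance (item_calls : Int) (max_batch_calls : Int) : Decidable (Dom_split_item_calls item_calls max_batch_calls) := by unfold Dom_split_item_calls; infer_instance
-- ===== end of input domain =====

-- B replaces A's subtract-until-zero loop by one divmod decomposition (simpler; same output).

-- ===== PORT A =====
-- A's while-loop, ported with a fuel counter that suffices on Pre_ (max_batch_calls ≥ 1):
-- each iteration removes at least 1, so (max 1 item_calls).toNat steps are enough.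
def splitLoopA : Nat → Int → Int → List Int
  | 0, _, _ => []
  | fuel + 1, remaining, m =>
    if remaining > 0 then
      let take := min remaining m
      take :: splitLoopA fuel (remaining - take) m
    else []

def split_item_calls (item_calls : Int) (max_batch_calls : Int) : List Int :=
  let remaining := max 1 item_calls
  splitLoopA remaining.toNat remaining max_batch_calls

-- ===== PORT B =====
def split_item_calls_alt (item_calls : Int) (max_batch_calls : Int) : List Int :=
  let n := max 1 item_calls
  let k := PySem.Int.floordiv n max_batch_calls
  let rem := PySem.Int.mod n max_batch_calls
  List.replicate k.toNat max_batch_calls ++ (if rem ≠ 0 then [rem] else [])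

-- ===== PRECONDITION & SPEC =====
-- Pre_ excludes max_batch_calls ≤ 0, on which A's while-loop never terminates (no return at all).
def Pre_split_item_calls (item_calls : Int) (max_batch_calls : Int) : Prop := 1 ≤ max_batch_calls
instance (item_calls : Int) (max_batch_calls : Int) : Decidable (Pre_split_item_calls item_calls max_batch_calls) := by unfold Pre_split_item_calls; infer_instance
def pvWitness_split_item_calls : Int × Int := (10, 3)

def Spec_split_item_calls (item_calls : Int) (max_batch_calls : Int) (out : List Int) : Prop := out = split_item_calls_alt item_calls max_batch_calls
instance (item_calls : Int) (max_batch_calls : Int) (out : List Int) : Decidable (Spec_split_item_calls item_calls max_batch_calls out) := by unfold Spec_split_item_calls; infer_instance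

-- ===== CLAIM (what is proved, stated in full; the proofs are below) =====
def Claim_equal_split_item_calls : Prop := ∀ (item_calls : Int) (max_batch_calls : Int), Dom_split_item_calls item_calls max_batch_calls → Pre_split_item_calls item_calls max_batch_calls → Spec_split_item_calls item_calls max_batch_calls (split_item_calls item_calls max_batch_calls)

-- ===== LEMMAS AND PROOFS =====
theorem splitLoopA_closed (fuel : Nat) :
    ∀ (n m : Int), 1 ≤ m → 0 ≤ n → n.toNat ≤ fuel →
    splitLoopA fuel n m =
      List.replicate (n / m).toNat m ++ (if n % m ≠ 0 then [n % m] else []) := by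
  induction fuel with
  | zero =>
    intro n m hm hn hf
    have hn0 : n = 0 := by omega
    subst hn0
    simp [splitLoopA]
  | succ fuel ih =>
    intro n m hm hn hf
    by_cases hpos : n > 0
    · simp only [splitLoopA, if_pos hpos]
      by_cases hle : n ≤ m
      · -- take = n, loop ends next step with remaining = 0
        have hmin : min n m = n := by omega
        rw [hmin]
        have : splitLoopA fuel (n - n) m = [] := by
          cases fuel <;> simp [splitLoopA]
        rw [this]
        rcases lt_or_eq_of_le hle with hlt | heq
        · have hdiv : n / m = 0 := Int.ediv_eq_zero_of_lt (by omega) hlt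
          have hmod : n % m = n := Int.emod_eq_of_lt (by omega) hlt
          simp [hdiv, hmod, hpos.ne']
        · subst heq
          have hdiv : n / n = 1 := Int.ediv_self (by omega)
          have hmod : n % n = 0 := Int.emod_self
          simp [hdiv]
      · -- take = m, recurse on n - m
        push Not at hle
        have hmin : min n m = m := by omega
        rw [hmin]
        have hrec := ih (n - m) m hm (by omega) (by omega)
        rw [hrec]
        have hdiv : n / m = (n - m) / m + 1 := by
          have := Int.add_mul_ediv_right (n - m) 1 (show m ≠ 0 by omega)
          simp at this; omega
        have hmod : n % m = (n - m) % m := by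
          rw [Int.sub_emod_right]
        have hdivnn : 0 ≤ (n - m) / m := Int.ediv_nonneg (by omega) (by omega)
        rw [hdiv, hmod]
        have : (((n - m) / m + 1)).toNat = ((n - m) / m).toNat + 1 := by omega
        rw [this, List.replicate_succ]
        simp
    · have hn0 : n = 0 := by omega
      subst hn0
      simp [splitLoopA]

-- ===== VERDICT (by name: the statement is the Claim_ definition above) =====
theorem split_item_calls_spec : Claim_equal_split_item_calls := by
  intro ic m _ hm
  unfold Pre_split_item_calls at hm
  unfold Spec_split_item_calls split_item_calls split_item_calls_alt
  have hn : (0:Int) ≤ max 1 ic := by omega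
  rw [splitLoopA_closed _ _ _ hm hn (le_refl _)]
  simp only []
  rw [PySem.Int.floordiv_eq_ediv_of_pos (show (0:Int) < m by omega), PySem.Int.mod_eq_emod_of_pos (show (0:Int) < m by omega)]
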